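-- pv_equiv track=rewrite | github.com/Glitterrosie/TextualDataErrorDetector | src/utils/specific_label_utils.py | is_transposition
-- ===== SOURCE A (Python) =====
-- def is_transposition(word, correct_words_list):
--     for i in range(len(word) - 1):
--         chars = list(word)
--         chars[i], chars[i+1] = chars[i+1], chars[i]
--         candidate = ''.join(chars)
--         if candidate in correct_words_list:
--             return True
--     return False
-- ===== SOURCE B (Python) =====
-- def is_transposition(word, correct_words_list):
--     n = len(word)
--     for cand in correct_words_list:
--         if len(cand) != n:
--             continue
--         diffs = [i for i in range(n) if word[i] != cand[i]]
--         if not diffs: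
--             if any(word[i] == word[i + 1] for i in range(n - 1)):
--                 return True
--         elif (len(diffs) == 2 and diffs[1] == diffs[0] + 1
--               and word[diffs[0]] == cand[diffs[1]]
--               and word[diffs[1]] == cand[diffs[0]]):
--             return True
--     return False
-- ===== Notes on version B (the rewrite author's own statement) =====
-- stated objective: alternative
-- what changed: Instead of generating each adjacent-swap candidate string and scanning the word list for it (a list scan per position of word), B scans the word list once and tests each candidate in place by length and mismatch positions (no mismatch plus an adjacent equal pair in word, or exactly [i, i+1] with crossed characters).
import Mathlib
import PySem

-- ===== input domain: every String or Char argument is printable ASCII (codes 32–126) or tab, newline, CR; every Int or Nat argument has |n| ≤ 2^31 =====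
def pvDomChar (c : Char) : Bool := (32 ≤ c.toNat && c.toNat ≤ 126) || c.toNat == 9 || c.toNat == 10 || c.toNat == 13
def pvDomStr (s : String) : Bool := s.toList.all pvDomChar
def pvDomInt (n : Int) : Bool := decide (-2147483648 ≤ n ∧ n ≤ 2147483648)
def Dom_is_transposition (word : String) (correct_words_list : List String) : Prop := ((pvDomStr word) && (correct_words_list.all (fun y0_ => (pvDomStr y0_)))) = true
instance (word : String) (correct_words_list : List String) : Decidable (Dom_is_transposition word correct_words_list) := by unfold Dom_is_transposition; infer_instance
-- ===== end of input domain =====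

-- B tests each dictionary word directly (length + mismatch positions) instead of building every
-- swapped candidate string and doing a membership scan per position: a different decomposition (alternative).

-- ===== PORT A =====
-- for i in range(len(word)-1): swap chars i,i+1; if candidate in list: return True
def is_transposition (word : String) (correct_words_list : List String) : Bool :=
  (List.range (word.toList.length - 1)).any (fun i =>
    let chars := word.toList
    let chars' := (chars.set i (chars.getD (i+1) ' ')).set (i+1) (chars.getD i ' ')
    correct_words_list.contains (String.ofList chars'))

-- ===== PORT B =====
-- per-candidate check: same length, and mismatch positions are either none (word has an
-- adjacent equal pair) or exactly [i, i+1] with the two characters crossed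
def pvMatches (w c : List Char) : Bool :=
  if c.length = w.length then
    match (List.range w.length).filter (fun i => !(w.getD i ' ' == c.getD i ' ')) with
    | [] => (List.range (w.length - 1)).any (fun i => w.getD i ' ' == w.getD (i+1) ' ')
    | [i, j] => (j == i + 1) && (w.getD i ' ' == c.getD j ' ') && (w.getD j ' ' == c.getD i ' ')
    | _ => false
  else false

def is_transposition_alt (word : String) (correct_words_list : List String) : Bool :=
  correct_words_list.any (fun c => pvMatches word.toList c.toList)

-- ===== PRECONDITION & SPEC =====
def Spec_is_transposition (word : String) (correct_words_list : List String) (out : Bool) : Prop := out = is_transposition_alt word correct_words_list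
instance (word : String) (correct_words_list : List String) (out : Bool) : Decidable (Spec_is_transposition word correct_words_list out) := by unfold Spec_is_transposition; infer_instance

-- ===== CLAIM (what is proved, stated in full; the proofs are below) =====
def Claim_equal_is_transposition : Prop := ∀ (word : String) (correct_words_list : List String), Dom_is_transposition word correct_words_list → Spec_is_transposition word correct_words_list (is_transposition word correct_words_list)

-- ===== LEMMAS AND PROOFS =====

-- the swapped list A builds at index i
def pvSwap (w : List Char) (i : Nat) : List Char :=
  (w.set i (w.getD (i+1) ' ')).set (i+1) (w.getD i ' ')

theorem pvSwap_length (w : List Char) (i : Nat) : (pvSwap w i).length = w.length := by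
  simp [pvSwap]

theorem pvSwap_getD (w : List Char) (i j : Nat) (hi : i + 1 < w.length) :
    (pvSwap w i).getD j ' ' =
      if j = i then w.getD (i+1) ' ' else if j = i + 1 then w.getD i ' ' else w.getD j ' ' := by
  unfold pvSwap
  simp only [List.getD_eq_getElem?_getD, List.getElem?_set, List.length_set]
  by_cases h1 : j = i <;> by_cases h2 : j = i + 1 <;>
    simp [h1, h2, Ne.symm, hi, Nat.lt_of_succ_lt hi]

theorem filter_range_pair (i : Nat) :
    ∀ n, i + 1 < n →
      (List.range n).filter (fun k => (k == i) || (k == i + 1)) = [i, i + 1] := by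
  intro n
  induction n with
  | zero => omega
  | succ m ih =>
    intro h
    rw [List.range_succ, List.filter_append]
    rcases Nat.lt_or_ge (i+1) m with hm | hm
    · have : ¬ (m = i ∨ m = i + 1) := by omega
      simp [ih hm, List.filter_cons]
      omega
    · have hmeq : m = i + 1 := by omega
      subst hmeq
      have : (List.range (i+1)).filter (fun k => (k == i) || (k == i + 1)) = [i] := by
        rw [List.range_succ, List.filter_append]
        have : (List.range i).filter (fun k => (k == i) || (k == i + 1)) = [] := by
          rw [List.filter_eq_nil_iff]
          intro k hk
          have := List.mem_range.mp hk
          simp; omega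
        simp [this]
      simp [this]

theorem pvMatches_iff (w c : List Char) :
    pvMatches w c = true ↔ ∃ i, i + 1 < w.length ∧ pvSwap w i = c := by
  constructor
  · intro h
    unfold pvMatches at h
    split_ifs at h with hlen
    · rcases hfd : (List.range w.length).filter (fun i => !(w.getD i ' ' == c.getD i ' ')) with
        _ | ⟨i, _ | ⟨j, _ | _⟩⟩ <;> rw [hfd] at h
      · -- no mismatch: c = w, and some adjacent equal pair
        have hcw : c = w := by
          apply List.ext_getElem (by omega)
          intro k hk1 hk2
          have := List.filter_eq_nil_iff.mp hfd k (List.mem_range.mpr hk2)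
          have : w.getD k ' ' = c.getD k ' ' := by simpa using this
          simpa [List.getD_eq_getElem?_getD, List.getElem?_eq_getElem, hk1, hk2] using this.symm
        simp only [List.any_eq_true, List.mem_range, beq_iff_eq] at h
        obtain ⟨i, hi, heq⟩ := h
        refine ⟨i, by omega, ?_⟩
        rw [hcw]
        apply List.ext_getElem (by simp [pvSwap_length])
        intro k hk1 hk2
        have hgd := pvSwap_getD w i k (by omega)
        have hval : (pvSwap w i).getD k ' ' = w.getD k ' ' := by
          rw [hgd]; split_ifs with h1 h2 <;> simp_all
        simpa [List.getD_eq_getElem?_getD, List.getElem?_eq_getElem, hk1, hk2] using hval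
      · simp at h
      · -- exactly two crossed mismatches at i, j = i+1
        simp only [Bool.and_eq_true, beq_iff_eq] at h
        obtain ⟨⟨hji, hwc1⟩, hwc2⟩ := h
        subst hji
        have hmem : ∀ k, k ∈ (List.range w.length).filter
            (fun i => !(w.getD i ' ' == c.getD i ' ')) ↔ k ∈ [i, i+1] := by
          intro k; rw [hfd]
        have hi1 : i + 1 < w.length := by
          have := (hmem (i+1)).mpr (by simp)
          simpa using (List.mem_range.mp (List.mem_of_mem_filter this))
        refine ⟨i, hi1, ?_⟩
        apply List.ext_getElem (by simp [pvSwap_length]; omega)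
        intro k hk1 hk2
        have hgd := pvSwap_getD w i k hi1
        have hval : (pvSwap w i).getD k ' ' = c.getD k ' ' := by
          rw [hgd]
          split_ifs with h1 h2
          · subst h1; exact hwc2
          · subst h2; exact hwc1
          · -- k not a mismatch position
            have hk : k ∉ [i, i+1] := by simp [h1, h2]
            have := (hmem k).not.mpr hk
            have hkr : k ∈ List.range w.length := List.mem_range.mpr (by omega)
            by_contra hne
            exact this (List.mem_filter.mpr ⟨hkr, by simpa using hne⟩)
        simpa [List.getD_eq_getElem?_getD, List.getElem?_eq_getElem, hk1, hk2] using hval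
      · simp at h
  · rintro ⟨i, hi, rfl⟩
    unfold pvMatches
    rw [if_pos (by simp [pvSwap_length])]
    by_cases heq : w.getD i ' ' = w.getD (i+1) ' '
    · -- swap is a no-op: mismatch list empty, adjacent equal pair found at i
      have hsw : ∀ k, (pvSwap w i).getD k ' ' = w.getD k ' ' := by
        intro k
        rw [pvSwap_getD w i k hi]
        split_ifs with h1 h2 <;> simp_all
      have hnil : (List.range w.length).filter
          (fun k => !(w.getD k ' ' == (pvSwap w i).getD k ' ')) = [] := by
        rw [List.filter_eq_nil_iff]
        intro k _
        have h := hsw k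
        simp only [List.getD_eq_getElem?_getD] at h
        simp [h]
      rw [hnil]
      simp only [List.any_eq_true, List.mem_range, beq_iff_eq]
      exact ⟨i, by omega, heq⟩
    · -- mismatch list is exactly [i, i+1]
      have hcong : (List.range w.length).filter
          (fun k => !(w.getD k ' ' == (pvSwap w i).getD k ' ')) =
          (List.range w.length).filter (fun k => (k == i) || (k == i + 1)) := by
        apply List.filter_congr
        intro k _
        rw [pvSwap_getD w i k hi]
        split_ifs with h1 h2
        · subst h1
          have h := heq
          simp only [List.getD_eq_getElem?_getD] at h
          simp [h]
        · subst h2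
          have h : ¬ w.getD (i+1) ' ' = w.getD i ' ' := fun e => heq e.symm
          simp only [List.getD_eq_getElem?_getD] at h
          simp [h]
        · simp [h1, h2]
      rw [hcong, filter_range_pair i w.length hi]
      have e1 : (pvSwap w i).getD i ' ' = w.getD (i+1) ' ' := by
        rw [pvSwap_getD w i i hi]; simp
      have e2 : (pvSwap w i).getD (i+1) ' ' = w.getD i ' ' := by
        rw [pvSwap_getD w i (i+1) hi, if_neg (by omega), if_pos rfl]
      simp only [List.getD_eq_getElem?_getD] at e1 e2
      simp [e1, e2]

-- ===== VERDICT (by name: the statement is the Claim_ definition above) =====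
theorem is_transposition_spec : Claim_equal_is_transposition := by
  intro word cwl _
  unfold Spec_is_transposition is_transposition is_transposition_alt
  rw [Bool.eq_iff_iff]
  simp only [List.any_eq_true, List.mem_range, List.contains_eq_mem, decide_eq_true_eq,
    pvMatches_iff]
  constructor
  · rintro ⟨i, hi, hmem⟩
    refine ⟨_, hmem, i, by omega, ?_⟩
    simp [pvSwap, List.getD_eq_getElem?_getD]
  · rintro ⟨s, hs, i, hi, hsw⟩
    refine ⟨i, by omega, ?_⟩
    have h2 : String.ofList (pvSwap word.toList i) ∈ cwl := by
      rw [hsw]; simpa using hs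
    simpa [pvSwap, List.getD_eq_getElem?_getD] using h2
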